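-- pv_equiv track=rewrite | github.com/amaralvin7/invPOC | pyrite/unpacking.py | unpack_tracers
-- ===== SOURCE A (Python) =====
-- def slice_by_species(to_slice, species, state_elements):
--
--     sliced = [to_slice[i] for i, e in enumerate(
--         state_elements) if e.split('_')[0] == species]
--
--     return sliced
--
-- def unpack_tracers(tracers, state_elements, xhat, xhat_e, prefix=''):
--
--     tracer_estimates = {t: {} for t in tracers}
--
--     for t in tracer_estimates:
--         tracer_estimates[t]['posterior'] = slice_by_species(
--             xhat, t, state_elements)
--         tracer_estimates[t]['posterior_e'] = slice_by_species(
--             xhat_e, t, state_elements)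
--
--     return tracer_estimates
-- ===== SOURCE B (Python) =====
-- def unpack_tracers(tracers, state_elements, xhat, xhat_e, prefix=''):
--
--     tracer_estimates = {t: {'posterior': [], 'posterior_e': []} for t in tracers}
--
--     for i, e in enumerate(state_elements):
--         species = e.split('_')[0]
--         if species in tracer_estimates:
--             tracer_estimates[species]['posterior'].append(xhat[i])
--             tracer_estimates[species]['posterior_e'].append(xhat_e[i])
--
--     return tracer_estimates
-- ===== Notes on version B (the rewrite author's own statement) =====
-- stated objective: faster
-- what changed: Replaces A's per-tracer scanning (slice_by_species called twice for every tracer, each scanning and re-splitting all state elements) by pre-initialised empty lists per tracer and a single dispatching pass over enumerate(state_elements) that splits each element once and appends xhat[i]/xhat_e[i] to its species' lists.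
import Mathlib
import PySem

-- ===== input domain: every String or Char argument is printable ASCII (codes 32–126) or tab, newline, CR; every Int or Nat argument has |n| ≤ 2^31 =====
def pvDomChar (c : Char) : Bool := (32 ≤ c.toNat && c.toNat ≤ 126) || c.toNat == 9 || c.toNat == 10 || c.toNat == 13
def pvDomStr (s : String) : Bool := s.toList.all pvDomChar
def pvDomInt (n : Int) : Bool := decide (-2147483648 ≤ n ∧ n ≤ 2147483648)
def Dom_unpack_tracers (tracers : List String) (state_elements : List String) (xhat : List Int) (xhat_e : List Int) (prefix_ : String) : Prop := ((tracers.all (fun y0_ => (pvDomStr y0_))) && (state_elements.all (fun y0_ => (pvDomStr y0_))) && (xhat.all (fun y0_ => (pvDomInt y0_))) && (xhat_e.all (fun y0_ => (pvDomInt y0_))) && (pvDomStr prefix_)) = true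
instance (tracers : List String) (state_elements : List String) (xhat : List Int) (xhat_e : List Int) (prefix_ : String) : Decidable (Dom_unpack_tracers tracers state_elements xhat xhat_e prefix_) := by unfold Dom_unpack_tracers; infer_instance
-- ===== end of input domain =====

-- B replaces A's per-tracer scans (slice_by_species called twice per tracer) by ONE dispatching
-- pass over enumerate(state_elements) that appends each value to its species' pre-initialised lists.

-- shared leaf helper: e.split('_')[0]
def fieldOf (e : String) : String := ((PySem.Str.split? e "_").getD []).headD ""

-- ===== PORT A =====
def slice_by_species (to_slice : List Int) (species : String) (state_elements : List String) : List Int :=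
  ((PySem.List.enumerate state_elements 0).filter (fun p => fieldOf p.2 == species)).map
    (fun p => (PySem.List.pyGet? to_slice p.1).getD 0)

-- loop body of A's 'for t in tracer_estimates': two key assignments on the inner dict
def aStep (state_elements : List String) (xhat : List Int) (xhat_e : List Int)
    (d : PySem.Dict String (PySem.Dict String (List Int))) (t : String) :
    PySem.Dict String (PySem.Dict String (List Int)) :=
  let d1 := d.modify t PySem.Dict.empty (fun inner => inner.insert "posterior" (slice_by_species xhat t state_elements))
  d1.modify t PySem.Dict.empty (fun inner => inner.insert "posterior_e" (slice_by_species xhat_e t state_elements))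

def unpack_tracers (tracers : List String) (state_elements : List String) (xhat : List Int) (xhat_e : List Int) (prefix_ : String) : List (String × List (String × List Int)) :=
  let te0 : PySem.Dict String (PySem.Dict String (List Int)) :=
    tracers.foldl (fun d t => d.insert t PySem.Dict.empty) PySem.Dict.empty
  let te := te0.keys.foldl (aStep state_elements xhat xhat_e) te0
  te.items.map (fun p => (p.1, p.2.items))

-- ===== PORT B =====
-- loop body of B's single pass: dispatch element (i, e) to its species' lists, if any
def altStep (xhat : List Int) (xhat_e : List Int)
    (d : PySem.Dict String (PySem.Dict String (List Int))) (p : Int × String) :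
    PySem.Dict String (PySem.Dict String (List Int)) :=
  let species := fieldOf p.2
  if d.contains species then
    let d1 := d.modify species PySem.Dict.empty
      (fun inner => inner.modify "posterior" [] (· ++ [(PySem.List.pyGet? xhat p.1).getD 0]))
    d1.modify species PySem.Dict.empty
      (fun inner => inner.modify "posterior_e" [] (· ++ [(PySem.List.pyGet? xhat_e p.1).getD 0]))
  else d

def unpack_tracers_alt (tracers : List String) (state_elements : List String) (xhat : List Int) (xhat_e : List Int) (prefix_ : String) : List (String × List (String × List Int)) :=
  let te0 : PySem.Dict String (PySem.Dict String (List Int)) :=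
    tracers.foldl (fun d t => d.insert t (PySem.Dict.ofList [("posterior", ([] : List Int)), ("posterior_e", ([] : List Int))])) PySem.Dict.empty
  let te := (PySem.List.enumerate state_elements 0).foldl (altStep xhat xhat_e) te0
  te.items.map (fun p => (p.1, p.2.items))

-- ===== PRECONDITION & SPEC =====
-- Pre_ excludes exactly the inputs where the Python A (and B) raises IndexError: a state element
-- whose species is one of the tracers at a position beyond the end of xhat or xhat_e. The Lean
-- ports totalise that indexing with getD 0 at the same positions, so the equality proved below
-- happens to hold unconditionally; Pre_ marks where the claim speaks for the Pythons.
def Pre_unpack_tracers (tracers : List String) (state_elements : List String) (xhat : List Int) (xhat_e : List Int) (prefix_ : String) : Prop :=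
  ∀ k (h : k < state_elements.length), fieldOf state_elements[k] ∈ tracers → k < xhat.length ∧ k < xhat_e.length
instance (tracers : List String) (state_elements : List String) (xhat : List Int) (xhat_e : List Int) (prefix_ : String) : Decidable (Pre_unpack_tracers tracers state_elements xhat xhat_e prefix_) := by unfold Pre_unpack_tracers; infer_instance

def pvWitness_unpack_tracers : List String × List String × List Int × List Int × String :=
  (["POC", "PON"], ["POC_w1", "PON_a", "DIC_b"], [1, 2, 3], [4, 5, 6], "")

def Spec_unpack_tracers (tracers : List String) (state_elements : List String) (xhat : List Int) (xhat_e : List Int) (prefix_ : String) (out : List (String × List (String × List Int))) : Prop := out = unpack_tracers_alt tracers state_elements xhat xhat_e prefix_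
instance (tracers : List String) (state_elements : List String) (xhat : List Int) (xhat_e : List Int) (prefix_ : String) (out : List (String × List (String × List Int))) : Decidable (Spec_unpack_tracers tracers state_elements xhat xhat_e prefix_ out) := by unfold Spec_unpack_tracers; infer_instance

-- ===== CLAIM (what is proved, stated in full; the proofs are below) =====
def Claim_equal_unpack_tracers : Prop := ∀ (tracers : List String) (state_elements : List String) (xhat : List Int) (xhat_e : List Int) (prefix_ : String), Dom_unpack_tracers tracers state_elements xhat xhat_e prefix_ → Pre_unpack_tracers tracers state_elements xhat xhat_e prefix_ → Spec_unpack_tracers tracers state_elements xhat xhat_e prefix_ (unpack_tracers tracers state_elements xhat xhat_e prefix_)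


-- ===== LEMMAS AND PROOFS =====

def innerOf (a b : List Int) : PySem.Dict String (List Int) :=
  PySem.Dict.ofList [("posterior", a), ("posterior_e", b)]

lemma innerOf_mod_post (a b : List Int) (f : List Int → List Int) :
    (innerOf a b).modify "posterior" [] f = innerOf (f a) b := rfl

lemma innerOf_mod_post_e (a b : List Int) (f : List Int → List Int) :
    (innerOf a b).modify "posterior_e" [] f = innerOf a (f b) := rfl

lemma getD_mk_map (base : List String) (g : String → PySem.Dict String (List Int))
    (s : String) (hs : s ∈ base) (d0 : PySem.Dict String (List Int)) :
    (PySem.Dict.mk (base.map (fun t => (t, g t)))).getD s d0 = g s := by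
  induction base with
  | nil => simp at hs
  | cons t rest ih =>
    by_cases h : t = s
    · subst h
      simp [PySem.Dict.getD_eq_get?_getD, PySem.Dict.get?_mk_cons]
    · have hs' : s ∈ rest := by
        rcases List.mem_cons.mp hs with h1 | h1
        · exact absurd h1.symm h
        · exact h1
      have := ih hs'
      simp only [PySem.Dict.getD_eq_get?_getD, List.map_cons, PySem.Dict.get?_mk_cons] at this ⊢
      simpa [h] using this

lemma contains_mk_map (base : List String) (g : String → PySem.Dict String (List Int)) (s : String) :
    (PySem.Dict.mk (base.map (fun t => (t, g t)))).contains s = decide (s ∈ base) := by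
  rw [PySem.Dict.contains_eq_decide_mem_keys]
  simp [PySem.Dict.keys]

lemma insert_mk_map (base : List String) (g : String → PySem.Dict String (List Int))
    (s : String) (hs : s ∈ base) (v : PySem.Dict String (List Int)) :
    (PySem.Dict.mk (base.map (fun t => (t, g t)))).insert s v =
      PySem.Dict.mk (base.map (fun t => (t, if t = s then v else g t))) := by
  apply PySem.Dict.ext
  rw [PySem.Dict.items_insert_of_contains _ v (by rw [contains_mk_map]; simpa using hs)]
  rw [List.map_map]
  apply List.map_congr_left
  intro t _
  by_cases h : t = s <;> simp [h]

lemma modify_eq_insert (d : PySem.Dict String (PySem.Dict String (List Int))) (k : String)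
    (d0 : PySem.Dict String (List Int)) (f : PySem.Dict String (List Int) → PySem.Dict String (List Int)) :
    d.modify k d0 f = d.insert k (f (d.getD k d0)) := rfl

lemma foldl_insert_const (c : PySem.Dict String (List Int)) (l : List String) :
    ∀ base : List String,
      (l.foldl (fun d t => d.insert t c) (PySem.Dict.mk (base.map (fun t => (t, c))))) =
        PySem.Dict.mk ((PySem.Set.update base l).map (fun t => (t, c))) := by
  induction l with
  | nil => intro base; simp [PySem.Set.update]
  | cons t rest ih =>
    intro base
    simp only [List.foldl_cons]
    by_cases h : t ∈ base
    · have h1 : (PySem.Dict.mk (base.map (fun t => (t, c)))).insert t c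
          = PySem.Dict.mk (base.map (fun t => (t, c))) := by
        apply PySem.Dict.ext
        rw [PySem.Dict.items_insert_of_contains _ c
          (by rw [PySem.Dict.contains_eq_decide_mem_keys]; simp [PySem.Dict.keys, h])]
        rw [List.map_map]
        apply List.map_congr_left
        intro s _
        by_cases hs : s = t <;> simp [hs]
      have h2 : PySem.Set.add base t = base := by simp [PySem.Set.add, h]
      rw [h1, ih base]
      simp [PySem.Set.update, h2]
    · have h1 : (PySem.Dict.mk (base.map (fun t => (t, c)))).insert t c
          = PySem.Dict.mk ((base ++ [t]).map (fun t => (t, c))) := by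
        apply PySem.Dict.ext
        rw [PySem.Dict.items_insert_of_not_contains _ c
          (by rw [PySem.Dict.contains_eq_decide_mem_keys]; simp [PySem.Dict.keys, h])]
        simp
      have h2 : PySem.Set.add base t = base ++ [t] := by simp [PySem.Set.add, h]
      rw [h1, ih (base ++ [t])]
      simp [PySem.Set.update, h2]

lemma altFold (xhat xhat_e : List Int) (L : List (Int × String)) :
    ∀ (base : List String) (p q : String → List Int),
      (L.foldl (altStep xhat xhat_e) (PySem.Dict.mk (base.map (fun t => (t, innerOf (p t) (q t)))))) =
        PySem.Dict.mk (base.map (fun t => (t, innerOf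
          (p t ++ ((L.filter (fun pr => fieldOf pr.2 == t)).map (fun pr => (PySem.List.pyGet? xhat pr.1).getD 0)))
          (q t ++ ((L.filter (fun pr => fieldOf pr.2 == t)).map (fun pr => (PySem.List.pyGet? xhat_e pr.1).getD 0)))))) := by
  induction L with
  | nil => intro base p q; simp
  | cons pr L ih =>
    intro base p q
    simp only [List.foldl_cons]
    by_cases h : fieldOf pr.2 ∈ base
    · have hstep : altStep xhat xhat_e (PySem.Dict.mk (base.map (fun t => (t, innerOf (p t) (q t))))) pr
          = PySem.Dict.mk (base.map (fun t => (t, innerOf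
              (if t = fieldOf pr.2 then p t ++ [(PySem.List.pyGet? xhat pr.1).getD 0] else p t)
              (if t = fieldOf pr.2 then q t ++ [(PySem.List.pyGet? xhat_e pr.1).getD 0] else q t)))) := by
        unfold altStep
        rw [if_pos (by rw [contains_mk_map]; simpa using h)]
        have e1 : (PySem.Dict.mk (base.map (fun t => (t, innerOf (p t) (q t))))).modify (fieldOf pr.2) PySem.Dict.empty
              (fun inner => inner.modify "posterior" [] (· ++ [(PySem.List.pyGet? xhat pr.1).getD 0]))
            = PySem.Dict.mk (base.map (fun t => (t, innerOf
                (if t = fieldOf pr.2 then p t ++ [(PySem.List.pyGet? xhat pr.1).getD 0] else p t) (q t)))) := by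
          rw [modify_eq_insert, getD_mk_map _ _ _ h, innerOf_mod_post, insert_mk_map _ _ _ h]
          congr 1
          apply List.map_congr_left
          intro t _
          by_cases ht : t = fieldOf pr.2 <;> simp [ht]
        rw [e1, modify_eq_insert,
            getD_mk_map _ (fun t => innerOf (if t = fieldOf pr.2 then p t ++ [(PySem.List.pyGet? xhat pr.1).getD 0] else p t) (q t)) _ h,
            insert_mk_map _ _ _ h]
        congr 1
        apply List.map_congr_left
        intro t _
        by_cases ht : t = fieldOf pr.2 <;> simp [ht, innerOf_mod_post_e]
      rw [hstep]
      rw [ih base _ _]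
      congr 1
      apply List.map_congr_left
      intro t _
      by_cases ht : t = fieldOf pr.2
      · simp [ht, List.append_assoc]
      · have : (fieldOf pr.2 == t) = false := by simp [Ne.symm ht]  -- filter drops pr? wait
        simp [this, ht]
    · have hstep : altStep xhat xhat_e (PySem.Dict.mk (base.map (fun t => (t, innerOf (p t) (q t))))) pr
          = PySem.Dict.mk (base.map (fun t => (t, innerOf (p t) (q t)))) := by
        unfold altStep
        rw [if_neg (by rw [contains_mk_map]; simpa using h)]
      rw [hstep, ih base p q]
      congr 1
      apply List.map_congr_left
      intro t ht
      have hne : (fieldOf pr.2 == t) = false := by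
        simp only [beq_eq_false_iff_ne, ne_eq]
        intro he; exact h (he ▸ ht)
      simp [hne]
lemma empty_ins_ins (a b : List Int) :
    ((PySem.Dict.empty.insert "posterior" a).insert "posterior_e" b) = innerOf a b := rfl

lemma aFold (state_elements : List String) (xhat xhat_e : List Int) :
    ∀ (todo base : List String) (g : String → PySem.Dict String (List Int)),
      todo.Nodup → (∀ t ∈ todo, t ∈ base) → (∀ t ∈ todo, g t = PySem.Dict.empty) →
      (todo.foldl (aStep state_elements xhat xhat_e) (PySem.Dict.mk (base.map (fun t => (t, g t))))) =
        PySem.Dict.mk (base.map (fun t => (t, if t ∈ todo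
          then innerOf (slice_by_species xhat t state_elements) (slice_by_species xhat_e t state_elements)
          else g t))) := by
  intro todo
  induction todo with
  | nil => intro base g _ _ _; simp
  | cons u rest ih =>
    intro base g hnd hsub hemp
    simp only [List.foldl_cons]
    have hu : u ∈ base := hsub u (by simp)
    have hstep : aStep state_elements xhat xhat_e (PySem.Dict.mk (base.map (fun t => (t, g t)))) u
        = PySem.Dict.mk (base.map (fun t => (t, if t = u
            then innerOf (slice_by_species xhat u state_elements) (slice_by_species xhat_e u state_elements)
            else g t))) := by
      unfold aStep
      have e1 : (PySem.Dict.mk (base.map (fun t => (t, g t)))).modify u PySem.Dict.empty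
            (fun inner => inner.insert "posterior" (slice_by_species xhat u state_elements))
          = PySem.Dict.mk (base.map (fun t => (t, if t = u
              then (PySem.Dict.empty.insert "posterior" (slice_by_species xhat u state_elements))
              else g t))) := by
        rw [modify_eq_insert, getD_mk_map _ _ _ hu, hemp u (by simp), insert_mk_map _ _ _ hu]
      rw [e1, modify_eq_insert,
          getD_mk_map _ (fun t => if t = u
              then (PySem.Dict.empty.insert "posterior" (slice_by_species xhat u state_elements))
              else g t) _ hu,
          insert_mk_map _ _ _ hu]
      congr 1
      apply List.map_congr_left
      intro t _
      by_cases ht : t = u <;> simp [ht, empty_ins_ins]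
    rw [hstep]
    rw [ih base _ (List.Nodup.of_cons hnd) (fun t htr => hsub t (by simp [htr]))
        (fun t htr => by
          have : t ≠ u := by rintro rfl; exact (List.nodup_cons.mp hnd).1 htr
          rw [if_neg this]; exact hemp t (by simp [htr]))]
    congr 1
    apply List.map_congr_left
    intro t _
    by_cases h1 : t ∈ rest
    · simp [h1]
    · by_cases h2 : t = u <;> simp [h1, h2]


-- ===== VERDICT (by name: the statement is the Claim_ definition above) =====
theorem unpack_tracers_spec : Claim_equal_unpack_tracers := by
  intro tracers state_elements xhat xhat_e prefix_ _ _
  unfold Spec_unpack_tracers unpack_tracers unpack_tracers_alt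

  have hA0 : tracers.foldl (fun d t => d.insert t (PySem.Dict.empty : PySem.Dict String (List Int))) PySem.Dict.empty
      = PySem.Dict.mk ((PySem.Set.ofList tracers).map (fun t => (t, (PySem.Dict.empty : PySem.Dict String (List Int))))) := by
    simpa [PySem.Set.update, PySem.Set.ofList] using foldl_insert_const PySem.Dict.empty tracers []
  have hB0 : tracers.foldl (fun d t => d.insert t (PySem.Dict.ofList [("posterior", ([] : List Int)), ("posterior_e", ([] : List Int))])) PySem.Dict.empty
      = PySem.Dict.mk ((PySem.Set.ofList tracers).map (fun t => (t, innerOf [] []))) := by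
    simpa [PySem.Set.update, PySem.Set.ofList] using
      foldl_insert_const (PySem.Dict.ofList [("posterior", ([] : List Int)), ("posterior_e", ([] : List Int))]) tracers []
  simp only [hA0, hB0]
  have hkeys : (PySem.Dict.mk ((PySem.Set.ofList tracers).map (fun t => (t, (PySem.Dict.empty : PySem.Dict String (List Int)))))).keys
      = PySem.Set.ofList tracers := by
    simp [PySem.Dict.keys, List.map_map, Function.comp_def]
  rw [hkeys]
  rw [aFold state_elements xhat xhat_e (PySem.Set.ofList tracers) (PySem.Set.ofList tracers)
      (fun _ => PySem.Dict.empty) (PySem.Set.nodup_ofList tracers) (fun t ht => ht) (fun _ _ => rfl)]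
  rw [altFold xhat xhat_e (PySem.List.enumerate state_elements 0) (PySem.Set.ofList tracers)
      (fun _ => []) (fun _ => [])]
  rw [List.map_map, List.map_map]
  apply List.map_congr_left
  intro t ht
  have htr : t ∈ tracers := by simpa [PySem.Set.mem_ofList] using ht
  simp [htr, slice_by_species]
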